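-- pv_equiv track=rewrite | github.com/llullum/Winter_Optimization | compute_deneigeuse/compute_deneigeuse.py | get_deneigeuse_info
-- ===== SOURCE A (Python) =====
-- def get_deneigeuse_info(list):
--     nbL1 = 0
--     nbL2 = 0
--     for _, t, _ in list:
--         if t == 1:
--             nbL1 += 1
--         else:
--             nbL2 += 1
--     return (nbL1, nbL2)
-- ===== SOURCE B (Python) =====
-- def get_deneigeuse_info(list):
--     counts = {}
--     for _, t, _ in list:
--         counts[t] = counts.get(t, 0) + 1
--     nbL1 = counts.get(1, 0)
--     nbL2 = sum(c for t, c in counts.items() if t != 1)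
--     return (nbL1, nbL2)
-- ===== Notes on version B (the rewrite author's own statement) =====
-- stated objective: alternative
-- what changed: B builds a histogram dict keyed by type in one grouping pass (no if/else on the type), then reads bucket 1 by lookup and obtains the second bucket by summing the counts of all other keys of the histogram.
import Mathlib
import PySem

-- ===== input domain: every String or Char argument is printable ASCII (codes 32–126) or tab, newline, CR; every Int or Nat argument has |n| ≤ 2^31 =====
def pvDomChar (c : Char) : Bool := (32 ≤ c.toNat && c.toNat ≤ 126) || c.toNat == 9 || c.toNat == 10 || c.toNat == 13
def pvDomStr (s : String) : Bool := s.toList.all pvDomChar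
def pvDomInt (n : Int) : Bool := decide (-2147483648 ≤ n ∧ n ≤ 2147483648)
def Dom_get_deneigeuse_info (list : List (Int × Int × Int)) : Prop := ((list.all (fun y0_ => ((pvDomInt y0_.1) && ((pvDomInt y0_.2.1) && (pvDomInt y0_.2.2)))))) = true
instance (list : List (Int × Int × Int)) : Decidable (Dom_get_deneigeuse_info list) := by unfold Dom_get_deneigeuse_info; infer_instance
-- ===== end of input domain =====

-- B replaces A's two if/else counters by a histogram dict over the type field, read afterwards; same cost, different algorithm.

-- ===== PORT A =====
-- literal transliteration of A: one fold carrying both counters, if/else on t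
def get_deneigeuse_info (list : List (Int × Int × Int)) : Int × Int :=
  list.foldl (fun acc x =>
    if x.2.1 = 1 then (acc.1 + 1, acc.2) else (acc.1, acc.2 + 1)) (0, 0)

-- ===== PORT B =====
-- transliteration of B: grouping pass counts[t] = counts.get(t,0)+1, then lookup of key 1
-- and a sum over the counts of the remaining histogram entries
def get_deneigeuse_info_alt (list : List (Int × Int × Int)) : Int × Int :=
  let counts : PySem.Dict Int Int :=
    list.foldl (fun d x => d.insert x.2.1 (d.getD x.2.1 0 + 1)) PySem.Dict.empty
  let nbL1 : Int := counts.getD 1 0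
  let nbL2 : Int := ((counts.items.filter (fun p => !(p.1 == 1))).map (·.2)).sum
  (nbL1, nbL2)

-- ===== PRECONDITION & SPEC =====
def Spec_get_deneigeuse_info (list : List (Int × Int × Int)) (out : Int × Int) : Prop := out = get_deneigeuse_info_alt list
instance (list : List (Int × Int × Int)) (out : Int × Int) : Decidable (Spec_get_deneigeuse_info list out) := by unfold Spec_get_deneigeuse_info; infer_instance

-- ===== CLAIM =====
def Claim_equal_get_deneigeuse_info : Prop := ∀ (list : List (Int × Int × Int)), Dom_get_deneigeuse_info list → Spec_get_deneigeuse_info list (get_deneigeuse_info list)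

-- ===== LEMMAS AND PROOFS =====
-- invariant of A's fold: counters are a + #(t = 1) and b + (len - #(t = 1))
theorem fold_count (l : List (Int × Int × Int)) (a b : Int) :
    l.foldl (fun acc x =>
      if x.2.1 = 1 then (acc.1 + 1, acc.2) else (acc.1, acc.2 + 1)) (a, b)
    = (a + (((l.map (fun x => x.2.1)).count 1 : Nat) : Int),
       b + ((l.length : Int) - (((l.map (fun x => x.2.1)).count 1 : Nat) : Int))) := by
  induction l generalizing a b with
  | nil => simp
  | cons h t ih =>
    simp only [List.foldl_cons, List.map_cons, List.length_cons]
    by_cases hc : h.2.1 = 1 <;>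
      simp [hc, ih] <;> ring

-- B's grouping fold is the standard counter over the mapped key list
theorem fold_is_counter (l : List (Int × Int × Int)) :
    l.foldl (fun d x => d.insert x.2.1 (d.getD x.2.1 0 + 1)) PySem.Dict.empty
    = PySem.Dict.counter (l.map (fun x => x.2.1)) := by
  rw [← PySem.Dict.foldl_insert_getD_add_one_eq_counter, List.foldl_map]

-- summing the histogram counts of the keys ≠ 1 gives length minus the count of 1
theorem sum_other_counts (ts : List Int) :
    (((PySem.Set.ofList ts).filter (fun k => !(k == 1))).map
        (fun k => ((ts.count k : Nat) : Int))).sum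
      = (ts.length : Int) - ((ts.count 1 : Nat) : Int) := by
  have hperm : (PySem.Set.ofList ts).Perm ts.dedup := by
    apply (List.perm_ext_iff_of_nodup (PySem.Set.nodup_ofList ts) ts.nodup_dedup).mpr
    intro a; simp [PySem.Set.mem_ofList]
  have hperm2 := ((hperm.filter (fun k => !(k == 1))).map
      (fun k => ((ts.count k : Nat) : Int)))
  rw [hperm2.sum_eq]
  have h := List.sum_map_count_dedup_filter_eq_countP (fun k => !(k == 1)) ts
  have h2 : ts.countP (fun k => !(k == 1)) + ts.countP (fun k => k == 1) = ts.length := by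
    simpa using (List.length_eq_countP_add_countP (p := fun k => !(k == 1)) (l := ts)).symm
  have hcast : ((ts.dedup.filter (fun k => !(k == 1))).map
      (fun k => ((ts.count k : Nat) : Int))).sum
      = ((((ts.dedup.filter (fun k => !(k == 1))).map (fun k => ts.count k)).sum : Nat) : Int) := by
    rw [Nat.cast_list_sum, List.map_map]; rfl
  rw [hcast, h]
  have : ts.count 1 = ts.countP (fun k => k == 1) := rfl
  omega

-- ===== VERDICT =====
theorem get_deneigeuse_info_spec : Claim_equal_get_deneigeuse_info := by
  intro l _
  unfold Spec_get_deneigeuse_info get_deneigeuse_info get_deneigeuse_info_alt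
  rw [fold_count, fold_is_counter]
  simp only [PySem.Dict.getD_counter, PySem.Dict.items_counter, List.filter_map,
    List.map_map, zero_add]
  have hs := sum_other_counts (l.map (fun x => x.2.1))
  simp only [List.length_map] at hs
  refine Prod.ext rfl ?_
  show (l.length : Int) - _ = _
  rw [← hs]
  simp [Function.comp_def]
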